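-- pv_equiv track=rewrite | github.com/Tharun1450/flask-card | utils/chunker.py | assemble_context
-- ===== SOURCE A (Python) =====
-- from typing import List
--
-- def assemble_context(chunks: List[str], max_chars: int = 4000) -> str:
--     """
--     Assemble retrieved chunks into a single context string for the LLM.
--     Truncates if total exceeds max_chars to stay within model context window.
--     """
--     context_parts = []
--     total = 0
--     for i, chunk in enumerate(chunks):
--         header = f"--- Retrieved Chunk {i + 1} ---\n"
--         block = header + chunk + "\n"
--         if total + len(block) > max_chars:
--             break
--         context_parts.append(block)
--         total += len(block)
--     return "\n".join(context_parts)
-- ===== SOURCE B (Python) =====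
-- def assemble_context(chunks, max_chars=4000):
--     """Same result as A: build all formatted blocks first, take prefix sums of
--     their lengths, keep the blocks whose cumulative total fits, then join."""
--     blocks = [f"--- Retrieved Chunk {i + 1} ---\n{chunk}\n" for i, chunk in enumerate(chunks)]
--     cums = []
--     t = 0
--     for b in blocks:
--         t += len(b)
--         cums.append(t)
--     # prefix sums are non-decreasing, so this filter keeps exactly the leading
--     # prefix of blocks that fits within max_chars
--     return "\n".join(b for c, b in zip(cums, blocks) if c <= max_chars)
-- ===== Notes on version B (the rewrite author's own statement) =====
-- stated objective: alternative
-- what changed: Replaced the fused accumulate-and-break loop with a build-all pipeline: format every block with a comprehension, compute prefix sums of the block lengths, keep the blocks whose cumulative total fits max_chars (prefix sums are monotone, so the filter equals the break-prefix), then join.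
import Mathlib
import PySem

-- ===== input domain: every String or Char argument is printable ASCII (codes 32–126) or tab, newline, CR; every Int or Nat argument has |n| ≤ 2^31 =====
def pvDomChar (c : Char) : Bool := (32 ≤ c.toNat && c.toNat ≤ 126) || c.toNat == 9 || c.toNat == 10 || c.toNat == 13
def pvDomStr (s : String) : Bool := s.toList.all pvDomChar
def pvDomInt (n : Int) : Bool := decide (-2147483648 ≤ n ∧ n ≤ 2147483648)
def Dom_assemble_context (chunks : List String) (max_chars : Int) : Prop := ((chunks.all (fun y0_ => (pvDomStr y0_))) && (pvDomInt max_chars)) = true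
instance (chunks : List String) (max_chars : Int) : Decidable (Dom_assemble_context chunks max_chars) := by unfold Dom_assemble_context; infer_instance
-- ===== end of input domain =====

-- B builds all formatted blocks first, computes prefix sums of their lengths, and keeps
-- the blocks whose cumulative total fits (alternative decomposition, same cost).

-- shared f-string: "--- Retrieved Chunk {i+1} ---\n" + chunk + "\n"  (as a char list)
def fmtBlock (i : Int) (chunk : String) : List Char :=
  ("--- Retrieved Chunk ".toList ++ PySem.Int.toChars (i + 1) ++ " ---\n".toList)
    ++ chunk.toList ++ "\n".toList

-- ===== PORT A =====
-- the fused for-loop: accumulate blocks until total + len(block) > max_chars, then break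
def ctxLoop (max_chars : Int) : List (Int × String) → Int → List (List Char) → List (List Char)
  | [], _, parts => parts
  | (i, chunk) :: rest, total, parts =>
    let block := fmtBlock i chunk
    if max_chars < total + (block.length : Int) then parts
    else ctxLoop max_chars rest (total + (block.length : Int)) (parts ++ [block])

def assemble_context (chunks : List String) (max_chars : Int) : String :=
  String.ofList (PySem.Chars.join "\n".toList (ctxLoop max_chars (PySem.List.enumerate chunks 0) 0 []))

-- ===== PORT B =====
-- cums.append(t := t + len(b)) over blocks: the list of prefix sums starting from t
def altCums : List (List Char) → Int → List Int
  | [], _ => []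
  | b :: bs, t => (t + (b.length : Int)) :: altCums bs (t + (b.length : Int))

def assemble_context_alt (chunks : List String) (max_chars : Int) : String :=
  let blocks := (PySem.List.enumerate chunks 0).map (fun p => fmtBlock p.1 p.2)
  String.ofList (PySem.Chars.join "\n".toList
    ((((altCums blocks 0).zip blocks).filter (fun p => decide (p.1 ≤ max_chars))).map (·.2)))

-- ===== PRECONDITION & SPEC =====
def Spec_assemble_context (chunks : List String) (max_chars : Int) (out : String) : Prop := out = assemble_context_alt chunks max_chars
instance (chunks : List String) (max_chars : Int) (out : String) : Decidable (Spec_assemble_context chunks max_chars out) := by unfold Spec_assemble_context; infer_instance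

-- ===== CLAIM (what is proved, stated in full; the proofs are below) =====
def Claim_equal_assemble_context : Prop := ∀ (chunks : List String) (max_chars : Int), Dom_assemble_context chunks max_chars → Spec_assemble_context chunks max_chars (assemble_context chunks max_chars)

-- ===== LEMMAS AND PROOFS =====

-- once the running total has overflowed, the filter keeps nothing (prefix sums only grow)
theorem filter_cums_nil (max_chars : Int) (bs : List (List Char)) :
    ∀ t : Int, max_chars < t →
      ((altCums bs t).zip bs).filter (fun p => decide (p.1 ≤ max_chars)) = [] := by
  induction bs with
  | nil => intro t _; simp [altCums]
  | cons b bs ih =>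
    intro t ht
    have h1 : max_chars < t + (b.length : Int) := by omega
    simp [altCums, not_le.mpr h1, ih _ h1]

-- A's loop emits exactly the blocks whose prefix sum (offset by the running total) fits
theorem ctxLoop_eq_filter (max_chars : Int) (es : List (Int × String)) :
    ∀ (t : Int) (parts : List (List Char)),
      ctxLoop max_chars es t parts =
        parts ++ ((((altCums (es.map (fun p => fmtBlock p.1 p.2)) t).zip
            (es.map (fun p => fmtBlock p.1 p.2))).filter
              (fun p => decide (p.1 ≤ max_chars))).map (·.2)) := by
  induction es with
  | nil => intro t parts; simp [ctxLoop, altCums]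
  | cons e rest ih =>
    intro t parts
    obtain ⟨i, chunk⟩ := e
    by_cases h : max_chars < t + ((fmtBlock i chunk).length : Int)
    · have hf := filter_cums_nil max_chars (rest.map (fun p => fmtBlock p.1 p.2)) _ h
      simp [ctxLoop, h, altCums, not_le.mpr h, hf]
    · simp [ctxLoop, h, altCums, not_lt.mp h, ih]

-- ===== VERDICT (by name: the statement is the Claim_ definition above) =====
theorem assemble_context_spec : Claim_equal_assemble_context := by
  intro chunks max_chars _
  unfold Spec_assemble_context assemble_context assemble_context_alt
  rw [ctxLoop_eq_filter]
  simp
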